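-- pv_equiv track=rewrite | github.com/kashyapa/interview-prep | revise-daily/june_2021/educative/5_permutation_swapcase.py | permutations_swapcase
-- ===== SOURCE A (Python) =====
-- def permutations_swapcase(str):
--
--     perms = [str]
--
--     for i in range(len(str)):
--         if str[i].isalpha():
--             for j in range(len(perms)):
--                 chs = list(perms[j])
--                 chs[i] = chs[i].swapcase()
--                 perms.append("".join(chs))
--     return perms
-- ===== SOURCE B (Python) =====
-- def permutations_swapcase(str):
--     chars = list(str)
--     pos = [i for i in range(len(chars)) if chars[i].isalpha()]
--     out = [str]
--     for mask in range(1, 1 << len(pos)):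
--         b = mask.bit_length() - 1
--         t = out[mask - (1 << b)]
--         p = pos[b]
--         out.append(t[:p] + t[p].swapcase() + t[p+1:])
--     return out
-- ===== Notes on version B (the rewrite author's own statement) =====
-- stated objective: alternative
-- what changed: B precomputes the alphabetic positions and fills the 2^k outputs indexed by bit mask (first alpha position = lowest bit), building each string from the already-built string at the mask without its top bit with one slice-splice, instead of A's repeated doubling of a growing list with a char-list copy and rejoin per output.
import Mathlib
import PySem

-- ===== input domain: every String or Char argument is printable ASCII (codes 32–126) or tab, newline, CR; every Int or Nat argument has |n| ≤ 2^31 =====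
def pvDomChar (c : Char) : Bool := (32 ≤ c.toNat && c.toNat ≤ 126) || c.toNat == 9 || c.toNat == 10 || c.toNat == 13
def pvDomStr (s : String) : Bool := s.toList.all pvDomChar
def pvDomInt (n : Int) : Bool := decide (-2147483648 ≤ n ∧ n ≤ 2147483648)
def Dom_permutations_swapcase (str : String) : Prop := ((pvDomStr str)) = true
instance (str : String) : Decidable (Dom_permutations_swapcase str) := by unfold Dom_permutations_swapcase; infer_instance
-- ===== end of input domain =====

-- B fills the 2^k outputs indexed by bit mask (first alphabetic position = lowest bit),
-- deriving each from the already-built string at the mask without its top bit, instead of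
-- A's repeated doubling of a growing list (objective: alternative algorithm, same cost).

-- ===== PORT A =====

-- one-character str.swapcase() (exact for ASCII)
def pvSwap (c : Char) : Char :=
  if PySem.Chars.islower c then PySem.Chars.upperChar c
  else if PySem.Chars.isupper c then PySem.Chars.lowerChar c
  else c

def permutations_swapcase (str : String) : List String :=
  let cs := str.toList
  (List.range cs.length).foldl
    (fun perms i =>
      if PySem.Chars.isalpha (cs.getD i ' ') then
        (List.range perms.length).foldl
          (fun ps j =>
            let chs := (ps.getD j "").toList
            let chs := chs.set i (pvSwap (chs.getD i ' '))
            ps ++ [String.ofList chs])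
          perms
      else perms)
    [str]

-- ===== PORT B =====

-- Source B: out[0] = str; for mask in range(1, 1 << k): b = mask.bit_length()-1 (= Nat.log2 for
-- mask ≥ 1); out.append(t[:p] + t[p].swapcase() + t[p+1:]) with t = out[mask - (1 << b)].
-- String slicing/indexing done on toList (indices are always in range here).
def permutations_swapcase_alt (str : String) : List String :=
  let chars := str.toList
  let pos := (List.range chars.length).filter (fun i => PySem.Chars.isalpha (chars.getD i ' '))
  (List.range' 1 (2 ^ pos.length - 1)).foldl
    (fun out mask =>
      let b := Nat.log2 mask
      let t := (out.getD (mask - 2 ^ b) "").toList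
      let p := pos.getD b 0
      out ++ [String.ofList (t.take p ++ [pvSwap (t.getD p ' ')] ++ t.drop (p + 1))])
    [str]

-- ===== PRECONDITION & SPEC =====
def Spec_permutations_swapcase (str : String) (out : List String) : Prop := out = permutations_swapcase_alt str
instance (str : String) (out : List String) : Decidable (Spec_permutations_swapcase str out) := by unfold Spec_permutations_swapcase; infer_instance

-- ===== CLAIM (what is proved, stated in full; the proofs are below) =====
def Claim_equal_permutations_swapcase : Prop := ∀ (str : String), Dom_permutations_swapcase str → Spec_permutations_swapcase str (permutations_swapcase str)

-- ===== LEMMAS AND PROOFS =====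

-- the common semantic yardstick: toggle the positions of `pos` selected by the bits of `m`
def pvApplyMask (chs : List Char) (pos : List Nat) (m : Nat) : List Char :=
  match pos with
  | [] => chs
  | p :: rest =>
      pvApplyMask (if m % 2 = 1 then chs.set p (pvSwap (chs.getD p ' ')) else chs) rest (m / 2)

theorem pvApplyMask_zero (pos : List Nat) (cs : List Char) : pvApplyMask cs pos 0 = cs := by
  induction pos generalizing cs with
  | nil => rfl
  | cons p rest ih => simpa [pvApplyMask] using ih cs

theorem pvApplyMask_length (pos : List Nat) (cs : List Char) (m : Nat) :
    (pvApplyMask cs pos m).length = cs.length := by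
  induction pos generalizing cs m with
  | nil => rfl
  | cons p rest ih =>
      simp only [pvApplyMask]
      rw [ih]
      split <;> simp

-- a mask below 2^|as| never reaches the positions after the prefix `as`
theorem pvApplyMask_prefix (as rest : List Nat) (cs : List Char) (m : Nat)
    (h : m < 2 ^ as.length) : pvApplyMask cs (as ++ rest) m = pvApplyMask cs as m := by
  induction as generalizing cs m with
  | nil =>
      simp at h
      subst h
      simp [pvApplyMask, pvApplyMask_zero]
  | cons p as' ih =>
      have h2 : (2:ℕ) ^ (p :: as').length = 2 * 2 ^ as'.length := by
        simp [pow_succ]; ring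
      simp only [List.cons_append, pvApplyMask]
      exact ih _ _ (by omega)

-- adding 2^|as| sets exactly the appended position's bit
theorem pvApplyMask_high (as : List Nat) (cs : List Char) (a : Nat) (m : Nat)
    (h : m < 2 ^ as.length) :
    pvApplyMask cs (as ++ [a]) (m + 2 ^ as.length)
      = (pvApplyMask cs as m).set a (pvSwap ((pvApplyMask cs as m).getD a ' ')) := by
  induction as generalizing cs m with
  | nil =>
      simp at h
      subst h
      simp [pvApplyMask]
  | cons p rest ih =>
      have h2 : (2:ℕ) ^ (p :: rest).length = 2 * 2 ^ rest.length := by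
        simp [pow_succ]; ring
      simp only [List.cons_append, pvApplyMask]
      have hm : (m + 2 ^ (p :: rest).length) % 2 = m % 2 := by omega
      have hd : (m + 2 ^ (p :: rest).length) / 2 = m / 2 + 2 ^ rest.length := by omega
      rw [hm, hd]
      exact ih _ _ (by omega)

-- setting the top bit b of a mask toggles exactly position pos[b]
theorem pvApplyMask_mid (cs : List Char) (pos : List Nat) (b : Nat) (hb : b < pos.length)
    (low : Nat) (hlow : low < 2 ^ b) :
    pvApplyMask cs pos (low + 2 ^ b)
      = (pvApplyMask cs pos low).set (pos.getD b 0)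
          (pvSwap ((pvApplyMask cs pos low).getD (pos.getD b 0) ' ')) := by
  have htb : (pos.take b).length = b := by simp [List.length_take]; omega
  have htb1 : (pos.take (b + 1)).length = b + 1 := by simp [List.length_take]; omega
  have hsplit1 : pos.take (b + 1) = pos.take b ++ [pos.getD b 0] := by
    rw [List.take_add_one, List.getElem?_eq_getElem hb, List.getD_eq_getElem pos 0 hb]
    rfl
  have h1 : pvApplyMask cs pos (low + 2 ^ b) = pvApplyMask cs (pos.take (b + 1)) (low + 2 ^ b) := by
    conv_lhs => rw [← List.take_append_drop (b + 1) pos]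
    exact pvApplyMask_prefix _ _ _ _ (by rw [htb1]; have : (2:ℕ) ^ (b+1) = 2 * 2 ^ b := by ring
                                         omega)
  have h2 : pvApplyMask cs pos low = pvApplyMask cs (pos.take b) low := by
    conv_lhs => rw [← List.take_append_drop b pos]
    exact pvApplyMask_prefix _ _ _ _ (by rw [htb]; exact hlow)
  have h3 := pvApplyMask_high (pos.take b) cs (pos.getD b 0) low (by rw [htb]; exact hlow)
  rw [htb] at h3
  rw [h1, hsplit1, h3, h2]

-- A's inner loop: appending while indexing only the original prefix
theorem pv_inner_fold (g : String → String) (l : List Nat) (perms extra : List String)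
    (h : ∀ j ∈ l, j < perms.length) :
    l.foldl (fun ps j => ps ++ [g (ps.getD j "")]) (perms ++ extra)
      = perms ++ extra ++ l.map (fun j => g (perms.getD j "")) := by
  induction l generalizing extra with
  | nil => simp
  | cons j l ih =>
      simp only [List.foldl_cons, List.map_cons]
      rw [List.getD_append _ _ _ _ (h j (by simp))]
      rw [List.append_assoc perms extra, ih (extra ++ [g (perms.getD j "")])
            (fun j hj => h j (by simp [hj]))]
      simp

-- main invariant of A's outer loop: the perms list enumerates the masks in order
theorem pv_outer (cs : List Char) (l : List Nat) (as : List Nat) :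
    l.foldl
      (fun perms i =>
        if PySem.Chars.isalpha (cs.getD i ' ') then
          (List.range perms.length).foldl
            (fun ps j =>
              let chs := (ps.getD j "").toList
              let chs := chs.set i (pvSwap (chs.getD i ' '))
              ps ++ [String.ofList chs])
            perms
        else perms)
      ((List.range (2 ^ as.length)).map (fun m => String.ofList (pvApplyMask cs as m)))
    = (List.range (2 ^ (as ++ l.filter (fun i => PySem.Chars.isalpha (cs.getD i ' '))).length)).map
        (fun m => String.ofList (pvApplyMask cs (as ++ l.filter (fun i => PySem.Chars.isalpha (cs.getD i ' '))) m)) := by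
  induction l generalizing as with
  | nil => simp
  | cons i l ih =>
      by_cases ha : PySem.Chars.isalpha (cs.getD i ' ') = true
      · simp only [List.foldl_cons, List.filter_cons, ha, if_true]
        have hstage :
            (List.range ((List.range (2 ^ as.length)).map (fun m => String.ofList (pvApplyMask cs as m))).length).foldl
              (fun ps j =>
                let chs := (ps.getD j "").toList
                let chs := chs.set i (pvSwap (chs.getD i ' '))
                ps ++ [String.ofList chs])
              ((List.range (2 ^ as.length)).map (fun m => String.ofList (pvApplyMask cs as m)))
            = (List.range (2 ^ (as ++ [i]).length)).map
                (fun m => String.ofList (pvApplyMask cs (as ++ [i]) m)) := by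
          set perms := (List.range (2 ^ as.length)).map (fun m => String.ofList (pvApplyMask cs as m)) with hperms
          have hlen : perms.length = 2 ^ as.length := by simp [hperms]
          have := pv_inner_fold
            (fun s => String.ofList ((s.toList).set i (pvSwap ((s.toList).getD i ' '))))
            (List.range perms.length) perms []
            (fun j hj => by simpa using hj)
          simp only [List.append_nil] at this
          rw [this, hlen]
          have hmapnew :
              (List.range (2 ^ as.length)).map
                  (fun j => String.ofList (((perms.getD j "").toList).set i
                      (pvSwap (((perms.getD j "").toList).getD i ' '))))
                = (List.range (2 ^ as.length)).map
                  (fun m => String.ofList (pvApplyMask cs (as ++ [i]) (m + 2 ^ as.length))) := by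
            apply List.map_congr_left
            intro m hm
            rw [List.mem_range] at hm
            have : perms.getD m "" = String.ofList (pvApplyMask cs as m) := by
              rw [hperms, List.getD_eq_getElem?_getD]
              simp [hm]
            rw [this, pvApplyMask_high as cs i m hm]
            simp
          rw [hmapnew]
          have hsplit : (2:ℕ) ^ (as ++ [i]).length = 2 ^ as.length + 2 ^ as.length := by
            simp [pow_succ]; ring
          rw [hsplit, List.range_add, List.map_append, List.map_map]
          congr 1
          · apply List.map_congr_left
            intro m hm
            rw [List.mem_range] at hm
            rw [pvApplyMask_prefix as [i] cs m hm]
          · apply List.map_congr_left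
            intro m hm
            rw [List.mem_range] at hm
            simp only [Function.comp]
            rw [Nat.add_comm (2 ^ as.length) m]
        rw [hstage, ih (as ++ [i])]
        simp
      · simp only [List.foldl_cons, List.filter_cons, ha]
        simp only [Bool.false_eq_true, if_false]
        exact ih as

-- B's DP loop: after masks 1..m the out list enumerates masks 0..m
theorem pv_dp (cs : List Char) (pos : List Nat) (hpos : ∀ p ∈ pos, p < cs.length)
    (m : Nat) (hm : m < 2 ^ pos.length) :
    (List.range' 1 m).foldl
      (fun out mask =>
        let b := Nat.log2 mask
        let t := (out.getD (mask - 2 ^ b) "").toList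
        let p := pos.getD b 0
        out ++ [String.ofList (t.take p ++ [pvSwap (t.getD p ' ')] ++ t.drop (p + 1))])
      [String.ofList cs]
    = (List.range (m + 1)).map (fun mask => String.ofList (pvApplyMask cs pos mask)) := by
  induction m with
  | zero => simp [pvApplyMask_zero]
  | succ m ih =>
      rw [List.range'_1_concat, List.foldl_append, ih (by omega)]
      simp only [List.foldl_cons, List.foldl_nil]
      set b := Nat.log2 (1 + m) with hbdef
      have hmask1 : (1:ℕ) + m ≠ 0 := by omega
      have hblo : 2 ^ b ≤ 1 + m := Nat.log2_self_le hmask1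
      have hbhi : 1 + m < 2 ^ (b + 1) := Nat.lt_log2_self
      have hbk : b < pos.length := by
        by_contra hc
        push Not at hc
        have : (2:ℕ) ^ pos.length ≤ 2 ^ b := Nat.pow_le_pow_right (by omega) hc
        omega
      set low := 1 + m - 2 ^ b with hlowdef
      have hlowm : low ≤ m := by
        have : (1:ℕ) ≤ 2 ^ b := Nat.one_le_two_pow
        omega
      have hgetD : ((List.range (m + 1)).map (fun mask => String.ofList (pvApplyMask cs pos mask))).getD low ""
          = String.ofList (pvApplyMask cs pos low) := by
        rw [List.getD_eq_getElem?_getD]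
        simp [Nat.lt_succ_of_le hlowm]
      rw [hgetD]
      have hp : pos.getD b 0 ∈ pos := by
        rw [List.getD_eq_getElem pos 0 hbk]
        exact List.getElem_mem hbk
      have hplen : pos.getD b 0 < (pvApplyMask cs pos low).length := by
        rw [pvApplyMask_length]
        exact hpos _ hp
      have hset : (pvApplyMask cs pos low).take (pos.getD b 0)
            ++ [pvSwap ((pvApplyMask cs pos low).getD (pos.getD b 0) ' ')]
            ++ (pvApplyMask cs pos low).drop (pos.getD b 0 + 1)
          = (pvApplyMask cs pos low).set (pos.getD b 0)
              (pvSwap ((pvApplyMask cs pos low).getD (pos.getD b 0) ' ')) := by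
        rw [List.set_eq_take_cons_drop _ hplen]
        simp
      have hlow2 : low < 2 ^ b := by
        have h2 : (2:ℕ) ^ (b + 1) = 2 * 2 ^ b := by ring
        omega
      have hmid := pvApplyMask_mid cs pos b hbk low hlow2
      have hmaskeq : low + 2 ^ b = 1 + m := by omega
      rw [hmaskeq] at hmid
      simp only [String.toList_ofList]
      rw [hset, ← hmid, List.range_succ, List.map_append]
      simp [List.range_succ, Nat.add_comm 1 m]

-- ===== VERDICT (by name: the statement is the Claim_ definition above) =====
theorem permutations_swapcase_spec : Claim_equal_permutations_swapcase := by
  intro str _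
  unfold Spec_permutations_swapcase permutations_swapcase permutations_swapcase_alt
  simp only []
  have h0 : [str] = (List.range (2 ^ ([] : List Nat).length)).map
      (fun m => String.ofList (pvApplyMask str.toList [] m)) := by
    simp [pvApplyMask]
  conv_lhs => rw [h0]
  rw [pv_outer str.toList (List.range str.toList.length) []]
  set pos := (List.range str.toList.length).filter
      (fun i => PySem.Chars.isalpha (str.toList.getD i ' ')) with hposdef
  have hpos : ∀ p ∈ pos, p < str.toList.length := by
    intro p hp
    have := List.mem_of_mem_filter hp
    simpa using this
  have h1 : (1:ℕ) ≤ 2 ^ pos.length := Nat.one_le_two_pow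
  have hdp := pv_dp str.toList pos hpos (2 ^ pos.length - 1) (by omega)
  rw [String.ofList_toList] at hdp
  rw [hdp]
  have h2 : 2 ^ pos.length - 1 + 1 = 2 ^ pos.length := by omega
  rw [h2]
  simp
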